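-- pv_equiv track=rewrite | github.com/kwokgzj/codeStandard | util/review_util.py | is_macro_name
-- ===== SOURCE A (Python) =====
-- def is_macro_name(string):
--     """
--     验证给定字符串是否符合全大写下划线命名规范
--
--     命名规范要求：
--     1. 所有字母都是大写
--     2. 单词和数字之间用下划线分隔
--     3. 可以包含数字
--     4. 不能以数字开头
--     5. 不能包含除下划线外的其他特殊字符
--
--     Args:
--         string (str): 需要验证的字符串
--
--     Returns:
--         bool: 如果符合命名规范返回True，否则返回False
--     """
--     # 检查是否为空字符串
--     if not string:
--         return False
--
--     # 检查是否以非数字开头（不能以数字开头）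
--     if string[0].isdigit():
--         return False
--
--     # 检查是否只包含大写字母、数字和下划线
--     if not all(c.isupper() or c.isdigit() or c == '_' for c in string):
--         return False
--
--     # 检查是否有连续的下划线
--     if '__' in string:
--         return False
--
--     # # 使用更宽松的正则表达式进行检查
--     # # 允许数字前后都可以有下划线
--     # pattern = r'^[A-Z][A-Z0-9]*(_[A-Z0-9]+)*$'
--     # return bool(re.match(pattern, string))
--     return True
-- ===== SOURCE B (Python) =====
-- def is_macro_name(string):
--     if not string:
--         return False
--     if string[0].isdigit():
--         return False
--     parts = string.split('_')
--     if '' in parts[1:-1]: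
--         return False
--     return all(c.isupper() or c.isdigit() for part in parts for c in part)
-- ===== Notes on version B (the rewrite author's own statement) =====
-- stated objective: alternative
-- what changed: B tokenizes the string into its underscore-separated segments with split('_') and validates the segment list (no empty interior segment, every segment all uppercase/digits) instead of A's character-class scan plus '__' substring search.
import Mathlib
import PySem

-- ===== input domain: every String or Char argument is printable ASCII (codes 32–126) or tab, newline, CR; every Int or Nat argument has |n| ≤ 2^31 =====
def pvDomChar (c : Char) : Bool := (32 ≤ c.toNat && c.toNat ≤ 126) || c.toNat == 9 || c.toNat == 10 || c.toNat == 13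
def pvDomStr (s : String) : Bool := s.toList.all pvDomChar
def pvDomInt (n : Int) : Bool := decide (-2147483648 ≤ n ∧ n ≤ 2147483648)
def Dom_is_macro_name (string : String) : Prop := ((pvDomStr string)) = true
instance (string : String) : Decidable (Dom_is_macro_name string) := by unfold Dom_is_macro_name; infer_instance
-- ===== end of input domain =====

-- B tokenizes the string into underscore-separated segments (split('_')) and validates the segment list; alternative decomposition, same cost.


-- ===== PORT A =====
def is_macro_name (string : String) : Bool :=
  match string.toList with
  | [] => false                               -- if not string: return False
  | c :: _ =>
    if PySem.Chars.isdigit c then false       -- if string[0].isdigit(): return False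
    else if ¬ (string.toList.all (fun ch =>
        PySem.Chars.isupper ch || PySem.Chars.isdigit ch || ch == '_')) then false
    else if PySem.Str.isIn "__" string then false   -- the double-underscore substring test
    else true

-- ===== PORT B =====
-- hand port of str.split('_') for the single-character separator '_' (exact: Python's
-- split on a one-char separator yields the maximal '_'-free segments, keeping empties)
def pvSplitU : List Char → List (List Char)
  | [] => [[]]
  | c :: rest =>
    if c = '_' then [] :: pvSplitU rest
    else match pvSplitU rest with
      | [] => [[c]]          -- unreachable: pvSplitU never returns []
      | p :: ps => (c :: p) :: ps

def is_macro_name_alt (string : String) : Bool :=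
  match string.toList with
  | [] => false
  | c :: _ =>
    if PySem.Chars.isdigit c then false
    else
      let parts := pvSplitU string.toList
      if (PySem.List.slice parts (some 1) (some (-1))).contains [] then false   -- empty-segment membership in the interior slice parts[1:-1]
      else parts.all (fun p => p.all (fun ch => PySem.Chars.isupper ch || PySem.Chars.isdigit ch))

-- ===== PRECONDITION & SPEC =====
def Spec_is_macro_name (string : String) (out : Bool) : Prop := out = is_macro_name_alt string
instance (string : String) (out : Bool) : Decidable (Spec_is_macro_name string out) := by unfold Spec_is_macro_name; infer_instance

-- ===== CLAIM (what is proved, stated in full; the proofs are below) =====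
def Claim_equal_is_macro_name : Prop := ∀ (string : String), Dom_is_macro_name string → Spec_is_macro_name string (is_macro_name string)

-- ===== LEMMAS AND PROOFS =====
def pvOkUD (c : Char) : Bool := PySem.Chars.isupper c || PySem.Chars.isdigit c
def pvOk (c : Char) : Bool := pvOkUD c || c == '_'

def pvHasAdj : List Char → Bool
  | [] => false
  | c :: rest => (c == '_' && (rest.head?.getD 'A' == '_')) || pvHasAdj rest

theorem pvSplitU_ne_nil (cs : List Char) : pvSplitU cs ≠ [] := by
  cases cs with
  | nil => simp [pvSplitU]
  | cons c rest =>
    unfold pvSplitU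
    split_ifs
    · simp
    · cases h : pvSplitU rest <;> simp

-- a singleton split means the list has no underscore at its head (enough for L3)
theorem pvSplitU_singleton_head (cs : List Char) (p : List Char)
    (h : pvSplitU cs = [p]) : cs.head?.getD 'A' ≠ '_' := by
  cases cs with
  | nil => simp
  | cons c rest =>
    intro hc
    simp only [List.head?_cons, Option.getD_some] at hc
    rw [pvSplitU, if_pos hc] at h
    have := pvSplitU_ne_nil rest
    cases hs : pvSplitU rest with
    | nil => exact this hs
    | cons a as => simp [hs] at h

theorem pvSplitU_head_empty (c : Char) (rest : List Char) (p : List Char) (ps : List (List Char))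
    (h : pvSplitU (c :: rest) = p :: ps) : (p = [] ↔ c = '_') := by
  by_cases hc : c = '_'
  · rw [pvSplitU, if_pos hc] at h
    simp at h
    simp [hc, h.1.symm]
  · rw [pvSplitU, if_neg hc] at h
    cases hs : pvSplitU rest with
    | nil => rw [hs] at h; simp at h; simp [← h.1, hc]
    | cons q qs => rw [hs] at h; simp at h; simp [← h.1, hc]

-- L2: A's character-class scan equals B's per-segment scan
theorem pvSplitU_all (cs : List Char) :
    cs.all pvOk = (pvSplitU cs).all (fun p => p.all pvOkUD) := by
  induction cs with
  | nil => simp [pvSplitU]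
  | cons c rest ih =>
    by_cases hc : c = '_'
    · rw [pvSplitU, if_pos hc]
      simp [hc, pvOk, ih]
    · rw [pvSplitU, if_neg hc]
      cases hs : pvSplitU rest with
      | nil => exact absurd hs (pvSplitU_ne_nil rest)
      | cons p ps =>
        rw [hs] at ih
        simp only [List.all_cons, ih, List.all_cons]
        have : pvOk c = pvOkUD c := by simp [pvOk, hc]
        rw [this]
        cases pvOkUD c <;> simp

-- L3: the double-underscore test equals "some interior segment is empty"
theorem pvSplitU_adj (cs : List Char) :
    pvHasAdj cs = ((pvSplitU cs).tail.dropLast).contains [] := by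
  induction cs with
  | nil => simp [pvHasAdj, pvSplitU]
  | cons c rest ih =>
    by_cases hc : c = '_'
    · rw [pvSplitU, if_pos hc]
      cases hs : pvSplitU rest with
      | nil => exact absurd hs (pvSplitU_ne_nil rest)
      | cons p ps =>
        rw [hs] at ih
        simp only [List.tail_cons] at ih ⊢
        cases ps with
        | nil =>
          have hh := pvSplitU_singleton_head rest p hs
          simp only [List.dropLast_nil, List.dropLast_singleton] at ih ⊢
          simp [pvHasAdj, hc, ih, hh]
        | cons q qs =>
          have hne : rest ≠ [] := by
            intro h; rw [h] at hs; simp [pvSplitU] at hs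
          obtain ⟨d, t, rfl⟩ := List.exists_cons_of_ne_nil hne
          have hpe := pvSplitU_head_empty d t p (q :: qs) hs
          rw [List.dropLast_cons_of_ne_nil (by simp)]
          simp only [pvHasAdj, hc, List.head?_cons, Option.getD_some,
            List.contains_cons]
          by_cases hd : d = '_'
          · simp [hd, hpe.mpr hd]
          · have hp : p ≠ [] := fun h => hd (hpe.mp h)
            have h1 : (d == '_') = false := by simp [hd]
            have h2 : p.isEmpty = false := by simp [hp]
            simp only [pvHasAdj] at ih
            simp [h1] at ih
            simp [h1, h2, ih]
    · rw [pvSplitU, if_neg hc]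
      cases hs : pvSplitU rest with
      | nil => exact absurd hs (pvSplitU_ne_nil rest)
      | cons p ps =>
        rw [hs] at ih
        simp only [List.tail_cons] at ih ⊢
        simp [pvHasAdj, hc, ih]

theorem pvHead_underscore (rest : List Char) :
    rest.head?.getD 'A' = '_' ↔ ['_'] <+: rest := by
  cases rest with
  | nil =>
    simp only [List.head?_nil, Option.getD_none]
    constructor
    · intro h; exact absurd h (by decide)
    · intro h; exact absurd (List.IsPrefix.length_le h) (by simp)
  | cons d r => simp [List.cons_prefix_cons, eq_comm]

theorem pvHasAdj_iff_infix (cs : List Char) :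
    pvHasAdj cs = true ↔ ['_', '_'] <:+: cs := by
  induction cs with
  | nil => simp [pvHasAdj]
  | cons c rest ih =>
    rw [List.infix_cons_iff, List.cons_prefix_cons]
    simp only [pvHasAdj, Bool.or_eq_true, Bool.and_eq_true, beq_iff_eq, ih,
      pvHead_underscore]
    constructor <;> rintro (⟨h1, h2⟩ | h)
    · exact Or.inl ⟨h1.symm, h2⟩
    · exact Or.inr h
    · exact Or.inl ⟨h1.symm, h2⟩
    · exact Or.inr h

-- parts[1:-1] is tail.dropLast
theorem pvSlice_one_neg_one {α : Type} (xs : List α) :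
    PySem.List.slice xs (some 1) (some (-1)) = xs.tail.dropLast := by
  simp only [PySem.List.slice, PySem.List.clampIdx]
  cases xs with
  | nil => simp
  | cons x t =>
    simp only [List.length_cons, List.tail_cons]
    rw [List.dropLast_eq_take]
    simp
    split_ifs <;> omega

-- ===== VERDICT (by name: the statement is the Claim_ definition above) =====
theorem is_macro_name_spec : Claim_equal_is_macro_name := by
  intro s _
  unfold Spec_is_macro_name is_macro_name is_macro_name_alt
  cases hs : s.toList with
  | nil => rfl
  | cons c rest =>
    by_cases hd : PySem.Chars.isdigit c = true
    · simp [hd]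
    · have hin : PySem.Str.isIn "__" s = true ↔ ['_', '_'] <:+: (c :: rest) := by
        rw [PySem.Str.isIn_iff_infix]; simp [hs]
      have hall := pvSplitU_all (c :: rest)
      have hadj := pvSplitU_adj (c :: rest)
      by_cases hA : pvHasAdj (c :: rest) = true
      · have h1 : PySem.Str.isIn "__" s = true := hin.mpr ((pvHasAdj_iff_infix _).mp hA)
        have h2 : ((pvSplitU (c :: rest)).tail.dropLast).contains [] = true := by
          rw [← hadj]; exact hA
        simp at h1 h2
        simp [hd, h1, h2, pvSlice_one_neg_one]
      · have h1 : PySem.Str.isIn "__" s = false := by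
          rw [Bool.eq_false_iff]; intro h
          exact hA ((pvHasAdj_iff_infix _).mpr (hin.mp h))
        have h2 : ((pvSplitU (c :: rest)).tail.dropLast).contains [] = false := by
          rw [← hadj]; exact Bool.eq_false_iff.mpr hA
        have hall' : ((c :: rest).all fun ch => PySem.Chars.isupper ch || PySem.Chars.isdigit ch || ch == '_') = ((pvSplitU (c :: rest)).all fun p => p.all fun ch => PySem.Chars.isupper ch || PySem.Chars.isdigit ch) := by
          simpa [pvOk, pvOkUD] using pvSplitU_all (c :: rest)
        rw [hall']
        simp at h1 h2
        simp [hd, h1, h2, pvSlice_one_neg_one]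
        rw [show ∀ b : Bool, (!b) = decide (¬ b = true) from by decide]
        rw [decide_eq_decide]
        simp [List.all_eq_true]
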